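-- pv_equiv track=rewrite | github.com/Alea4jacta6est/scientific_app | protein_utils.py | get_pseudosequence
-- ===== SOURCE A (Python) =====
-- from typing import List
--
-- def get_pseudosequence(seq: str, mhc_residues: List[int]) -> str:
--     """Transforms the original sequence to a pseudosequence
--
--     Args:
--         seq (str): original sequence
--         mhc_residues (list): positions nums
--
--     Returns:
--         pseudoseq (str): _description_
--     """
--     pseudoseq = ""
--     for i, residue in enumerate(seq):
--         if i + 1 in mhc_residues:
--             pseudoseq += "-"
--         else:
--             pseudoseq += residue
--     return pseudoseq
-- ===== SOURCE B (Python) =====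
-- def get_pseudosequence(seq, mhc_residues):
--     chars = list(seq)
--     for p in mhc_residues:
--         if 1 <= p <= len(chars):
--             chars[p - 1] = "-"
--     return "".join(chars)
-- ===== Notes on version B (the rewrite author's own statement) =====
-- stated objective: faster
-- what changed: Instead of scanning the sequence and testing 'i+1 in mhc_residues' for every character (an inner list scan), B scatter-writes: it iterates over the positions once and overwrites the corresponding buffer cell with '-', skipping out-of-range positions.
import Mathlib
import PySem

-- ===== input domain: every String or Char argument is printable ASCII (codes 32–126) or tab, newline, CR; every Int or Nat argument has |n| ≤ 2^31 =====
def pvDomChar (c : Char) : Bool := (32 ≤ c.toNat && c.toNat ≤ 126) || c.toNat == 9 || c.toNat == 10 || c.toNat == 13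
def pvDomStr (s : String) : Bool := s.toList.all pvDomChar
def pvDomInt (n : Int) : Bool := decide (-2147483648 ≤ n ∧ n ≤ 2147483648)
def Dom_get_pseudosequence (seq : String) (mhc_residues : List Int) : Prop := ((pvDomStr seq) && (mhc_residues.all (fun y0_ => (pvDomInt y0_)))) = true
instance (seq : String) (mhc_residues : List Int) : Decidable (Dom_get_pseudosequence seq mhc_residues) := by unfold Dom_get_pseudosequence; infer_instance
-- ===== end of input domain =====

-- B replaces A's per-character membership scan with a single scatter-write pass over the positions (asymptotically faster).


-- ===== PORT A =====
-- A: scan the sequence with enumerate, membership test against the positions list.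
def get_pseudosequence (seq : String) (mhc_residues : List Int) : String :=
  String.ofList ((PySem.List.enumerate seq.toList).foldl
    (fun acc p => acc ++ [if mhc_residues.contains (p.1 + 1) then '-' else p.2]) [])

-- ===== PORT B =====
-- B: scatter-write into a char buffer; out-of-range positions are no-ops. Faster: no inner scan.
def get_pseudosequence_alt (seq : String) (mhc_residues : List Int) : String :=
  String.ofList (mhc_residues.foldl
    (fun cs p => if 1 ≤ p ∧ p ≤ (cs.length : Int) then cs.set (p - 1).toNat '-' else cs)
    seq.toList)

-- ===== PRECONDITION & SPEC =====
def Spec_get_pseudosequence (seq : String) (mhc_residues : List Int) (out : String) : Prop := out = get_pseudosequence_alt seq mhc_residues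
instance (seq : String) (mhc_residues : List Int) (out : String) : Decidable (Spec_get_pseudosequence seq mhc_residues out) := by unfold Spec_get_pseudosequence; infer_instance

-- ===== CLAIM (what is proved, stated in full; the proofs are below) =====
def Claim_equal_get_pseudosequence : Prop := ∀ (seq : String) (mhc_residues : List Int), Dom_get_pseudosequence seq mhc_residues → Spec_get_pseudosequence seq mhc_residues (get_pseudosequence seq mhc_residues)

-- ===== LEMMAS AND PROOFS =====

-- the B-side scatter loop preserves length
theorem alt_foldl_length (res : List Int) (cs : List Char) :
    (res.foldl (fun cs p => if 1 ≤ p ∧ p ≤ (cs.length : Int) then cs.set (p - 1).toNat '-' else cs) cs).length = cs.length := by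
  induction res generalizing cs with
  | nil => rfl
  | cons p t ih =>
    simp only [List.foldl_cons]
    split
    · rw [ih]; simp
    · exact ih cs

-- the B-side scatter loop, characterised pointwise (Option form: no dependent index proof)
theorem alt_foldl_getElem? (res : List Int) (cs : List Char) (j : Nat) (hj : j < cs.length) :
    (res.foldl (fun cs p => if 1 ≤ p ∧ p ≤ (cs.length : Int) then cs.set (p - 1).toNat '-' else cs) cs)[j]? =
      some (if res.contains ((j : Int) + 1) then '-' else cs[j]) := by
  induction res generalizing cs with
  | nil => simp [hj]
  | cons p t ih =>
    simp only [List.foldl_cons]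
    by_cases h : 1 ≤ p ∧ p ≤ (cs.length : Int)
    · rw [if_pos h]
      rw [ih (cs.set (p - 1).toNat '-') (by simpa using hj)]
      by_cases hp : p = (j : Int) + 1
      · have ht : (p - 1).toNat = j := by omega
        simp [ht, hp, hj, List.getElem_set]
      · have hne : p.toNat - 1 ≠ j := by omega
        have hj1 : ¬((j : Int) + 1 = p) := fun e => hp e.symm
        simp [List.getElem_set, hne, hj1]
    · rw [if_neg h]
      rw [ih cs hj]
      have hj1 : ¬((j : Int) + 1 = p) := by omega
      simp [hj1]

-- ===== VERDICT (by name: the statement is the Claim_ definition above) =====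
theorem get_pseudosequence_spec : Claim_equal_get_pseudosequence := by
  intro seq res _
  unfold Spec_get_pseudosequence get_pseudosequence get_pseudosequence_alt
  congr 1
  rw [PySem.List.foldl_append_singleton_eq_map, List.nil_append]
  apply List.ext_getElem?
  intro j
  by_cases hj : j < seq.toList.length
  · rw [alt_foldl_getElem? res seq.toList j hj]
    simp only [List.getElem?_map, PySem.List.getElem?_enumerate, List.getElem?_eq_getElem hj,
      Option.map_some]
    simp
  · have h1 : ((PySem.List.enumerate seq.toList 0).map
        (fun p => if res.contains (p.1 + 1) then '-' else p.2)).length ≤ j := by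
      simp only [List.length_map, PySem.List.length_enumerate]; omega
    have h2 : (res.foldl (fun cs p => if 1 ≤ p ∧ p ≤ (cs.length : Int) then cs.set (p - 1).toNat '-' else cs) seq.toList).length ≤ j := by
      rw [alt_foldl_length]; omega
    rw [List.getElem?_eq_none h1, List.getElem?_eq_none h2]
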